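-- pv_equiv track=rewrite | github.com/jgs159/gba-background-studio | ui/dialogs/open_tilemap_dialog.py | _get_possible_dimensions
-- ===== SOURCE A (Python) =====
-- def _get_possible_dimensions(total_tiles):
--     priority_w = [20, 32, 64]
--     priority = []
--     others = []
--
--     for w in range(1, total_tiles + 1):
--         if total_tiles % w == 0:
--             h = total_tiles // w
--             if 1 <= h <= 512:
--                 if w == 20 or w == 32:
--                     priority.append((w, h))
--                 elif w == 64 and h % 32 == 0:
--                     priority.append((w, h))
--                 elif w < 32 and w != 20:
--                     others.append((w, h))
--
--     order = {20: 0, 32: 1, 64: 2}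
--     priority.sort(key=lambda p: (order.get(p[0], 99), p[1]))
--     others.sort(key=lambda p: p[0])
--
--     return priority + others
-- ===== SOURCE B (Python) =====
-- def _get_possible_dimensions(total_tiles):
--     # Only widths 1..31 and 20/32/64 can ever be emitted, so check that fixed
--     # candidate set directly; emission order already matches A's sort order.
--     def height(w):
--         if total_tiles >= 1 and total_tiles % w == 0:
--             h = total_tiles // w
--             if h <= 512:
--                 return h
--         return None
--
--     result = []
--     for w in (20, 32, 64):
--         h = height(w)
--         if h is not None and (w != 64 or h % 32 == 0):
--             result.append((w, h))
--     for w in range(1, 32):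
--         if w != 20:
--             h = height(w)
--             if h is not None:
--                 result.append((w, h))
--     return result
-- ===== Notes on version B (the rewrite author's own statement) =====
-- stated objective: faster
-- what changed: Instead of scanning every w in 1..total_tiles, testing divisibility and re-sorting the two result lists, B checks only the fixed candidate widths (20, 32, 64 for priority and 1..31 except 20 for others) -- the only widths A can ever emit -- in an order that already matches A's sort keys, so the scan over total_tiles and both sorts disappear.
import Mathlib
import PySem

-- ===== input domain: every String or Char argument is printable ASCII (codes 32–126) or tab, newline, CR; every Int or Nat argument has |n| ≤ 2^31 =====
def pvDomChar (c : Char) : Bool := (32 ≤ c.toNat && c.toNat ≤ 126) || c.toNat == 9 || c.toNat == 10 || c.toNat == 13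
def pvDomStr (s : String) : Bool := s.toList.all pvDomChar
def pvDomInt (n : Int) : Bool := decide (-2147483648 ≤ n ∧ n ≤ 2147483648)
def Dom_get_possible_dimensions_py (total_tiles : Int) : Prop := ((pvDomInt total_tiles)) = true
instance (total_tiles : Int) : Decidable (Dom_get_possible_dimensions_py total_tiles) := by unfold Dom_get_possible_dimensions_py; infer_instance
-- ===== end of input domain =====

-- B replaces A's scan over 1..total_tiles plus two sorts by an O(1) check of the
-- fixed candidate widths (20/32/64 and 1..31 except 20), emitted already in A's sort order.


-- ===== PORT A =====
-- loop body of A's 'for w in range(1, total_tiles + 1)' (h = total_tiles // w inlined)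
def pvStepA (n : Int) (acc : List (Int × Int) × List (Int × Int)) (w : Int) :
    List (Int × Int) × List (Int × Int) :=
  if PySem.Int.mod n w = 0 then
    if 1 ≤ PySem.Int.floordiv n w ∧ PySem.Int.floordiv n w ≤ 512 then
      if w = 20 ∨ w = 32 then (acc.1 ++ [(w, PySem.Int.floordiv n w)], acc.2)
      else if w = 64 ∧ PySem.Int.mod (PySem.Int.floordiv n w) 32 = 0 then
        (acc.1 ++ [(w, PySem.Int.floordiv n w)], acc.2)
      else if w < 32 ∧ w ≠ 20 then (acc.1, acc.2 ++ [(w, PySem.Int.floordiv n w)])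
      else acc
    else acc
  else acc

def get_possible_dimensions_py (total_tiles : Int) : List (Int × Int) :=
  let res := (PySem.List.pyRange 1 (total_tiles + 1) 1).foldl (pvStepA total_tiles) ([], [])
  let order : PySem.Dict Int Int := PySem.Dict.ofList [(20, 0), (32, 1), (64, 2)]
  let priority := PySem.List.sorted2 res.1 (fun p => order.getD p.1 99) (fun p => p.2)
  let others := PySem.List.sorted res.2 (fun p => p.1)
  priority ++ others

-- ===== PORT B =====
-- B's local helper 'height(w)'
def pvHeightB (n w : Int) : Option Int :=
  if 1 ≤ n ∧ PySem.Int.mod n w = 0 then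
    if PySem.Int.floordiv n w ≤ 512 then some (PySem.Int.floordiv n w) else none
  else none

-- body of B's first loop 'for w in (20, 32, 64)'
def pvStepB1 (n : Int) (acc : List (Int × Int)) (w : Int) : List (Int × Int) :=
  match pvHeightB n w with
  | some h => if w ≠ 64 ∨ PySem.Int.mod h 32 = 0 then acc ++ [(w, h)] else acc
  | none => acc

-- body of B's second loop 'for w in range(1, 32)'
def pvStepB2 (n : Int) (acc : List (Int × Int)) (w : Int) : List (Int × Int) :=
  if w ≠ 20 then
    match pvHeightB n w with
    | some h => acc ++ [(w, h)]
    | none => acc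
  else acc

def get_possible_dimensions_py_alt (total_tiles : Int) : List (Int × Int) :=
  let result1 := [(20 : Int), 32, 64].foldl (pvStepB1 total_tiles) []
  (PySem.List.pyRange 1 32 1).foldl (pvStepB2 total_tiles) result1

-- ===== PRECONDITION & SPEC =====
def Spec_get_possible_dimensions_py (total_tiles : Int) (out : List (Int × Int)) : Prop := out = get_possible_dimensions_py_alt total_tiles
instance (total_tiles : Int) (out : List (Int × Int)) : Decidable (Spec_get_possible_dimensions_py total_tiles out) := by unfold Spec_get_possible_dimensions_py; infer_instance

-- ===== CLAIM (what is proved, stated in full; the proofs are below) =====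
def Claim_equal_get_possible_dimensions_py : Prop := ∀ (total_tiles : Int), Dom_get_possible_dimensions_py total_tiles → Spec_get_possible_dimensions_py total_tiles (get_possible_dimensions_py total_tiles)

-- ===== LEMMAS AND PROOFS =====

-- the classification predicates implicit in A's loop, and the emitted pair
def pvCondP (n w : Int) : Bool :=
  (PySem.Int.mod n w == 0) && decide (1 ≤ PySem.Int.floordiv n w) &&
    decide (PySem.Int.floordiv n w ≤ 512) &&
    (w == 20 || w == 32 || (w == 64 && (PySem.Int.mod (PySem.Int.floordiv n w) 32 == 0)))

def pvCondO (n w : Int) : Bool :=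
  (PySem.Int.mod n w == 0) && decide (1 ≤ PySem.Int.floordiv n w) &&
    decide (PySem.Int.floordiv n w ≤ 512) && decide (w < 32) && (w != 20)

def pvPair (n w : Int) : Int × Int := (w, PySem.Int.floordiv n w)

lemma pvCondP_iff (n w : Int) : pvCondP n w = true ↔
    PySem.Int.mod n w = 0 ∧ (1 ≤ PySem.Int.floordiv n w ∧ PySem.Int.floordiv n w ≤ 512) ∧
      ((w = 20 ∨ w = 32) ∨ (w = 64 ∧ PySem.Int.mod (PySem.Int.floordiv n w) 32 = 0)) := by
  simp [pvCondP]; tauto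

lemma pvCondO_iff (n w : Int) : pvCondO n w = true ↔
    PySem.Int.mod n w = 0 ∧ (1 ≤ PySem.Int.floordiv n w ∧ PySem.Int.floordiv n w ≤ 512) ∧
      w < 32 ∧ w ≠ 20 := by
  simp [pvCondO]; tauto

lemma pvFd_pos_iff (n w : Int) (hw : 0 < w) (hm : PySem.Int.mod n w = 0) :
    1 ≤ n ↔ 1 ≤ PySem.Int.floordiv n w := by
  have h := PySem.Int.floordiv_mul_add_mod n w
  rw [hm] at h
  constructor <;> intro h1 <;> nlinarith

lemma pvW_le (n w : Int) (hw : 0 < w) (hm : PySem.Int.mod n w = 0)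
    (h1 : 1 ≤ PySem.Int.floordiv n w) : w ≤ n := by
  have h := PySem.Int.floordiv_mul_add_mod n w
  rw [hm] at h
  nlinarith

lemma pvStepA_eq (n w : Int) (acc : List (Int × Int) × List (Int × Int)) :
    pvStepA n acc w =
      ((if pvCondP n w then acc.1 ++ [pvPair n w] else acc.1),
       (if pvCondO n w then acc.2 ++ [pvPair n w] else acc.2)) := by
  unfold pvStepA
  by_cases hm : PySem.Int.mod n w = 0
  · by_cases hb : 1 ≤ PySem.Int.floordiv n w ∧ PySem.Int.floordiv n w ≤ 512
    · by_cases h2032 : w = 20 ∨ w = 32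
      · have hP : pvCondP n w = true := (pvCondP_iff n w).2 ⟨hm, hb, Or.inl h2032⟩
        have hO : pvCondO n w = false := by
          rw [Bool.eq_false_iff, Ne, pvCondO_iff]
          rintro ⟨_, _, hlt, hne⟩
          rcases h2032 with h | h <;> omega
        rw [if_pos hm, if_pos hb, if_pos h2032, hP, hO]
        simp [pvPair]
      · by_cases h64 : w = 64 ∧ PySem.Int.mod (PySem.Int.floordiv n w) 32 = 0
        · have hP : pvCondP n w = true := (pvCondP_iff n w).2 ⟨hm, hb, Or.inr h64⟩
          have hO : pvCondO n w = false := by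
            rw [Bool.eq_false_iff, Ne, pvCondO_iff]
            rintro ⟨_, _, hlt, _⟩
            omega
          rw [if_pos hm, if_pos hb, if_neg h2032, if_pos h64, hP, hO]
          simp [pvPair]
        · have hP : pvCondP n w = false := by
            rw [Bool.eq_false_iff, Ne, pvCondP_iff]
            rintro ⟨_, _, hc⟩
            tauto
          by_cases ho : w < 32 ∧ w ≠ 20
          · have hO : pvCondO n w = true := (pvCondO_iff n w).2 ⟨hm, hb, ho⟩
            rw [if_pos hm, if_pos hb, if_neg h2032, if_neg h64, if_pos ho, hP, hO]
            simp [pvPair]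
          · have hO : pvCondO n w = false := by
              rw [Bool.eq_false_iff, Ne, pvCondO_iff]
              rintro ⟨_, _, hc1, hc2⟩
              exact ho ⟨hc1, hc2⟩
            rw [if_pos hm, if_pos hb, if_neg h2032, if_neg h64, if_neg ho, hP, hO]
            simp
    · have hP : pvCondP n w = false := by
        rw [Bool.eq_false_iff, Ne, pvCondP_iff]; rintro ⟨_, hb', _⟩; exact hb hb'
      have hO : pvCondO n w = false := by
        rw [Bool.eq_false_iff, Ne, pvCondO_iff]; rintro ⟨_, hb', _⟩; exact hb hb'
      rw [if_pos hm, if_neg hb, hP, hO]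
      simp
  · have hP : pvCondP n w = false := by
      rw [Bool.eq_false_iff, Ne, pvCondP_iff]; rintro ⟨hm', _⟩; exact hm hm'
    have hO : pvCondO n w = false := by
      rw [Bool.eq_false_iff, Ne, pvCondO_iff]; rintro ⟨hm', _⟩; exact hm hm'
    rw [if_neg hm, hP, hO]
    simp

lemma pvFoldA (n : Int) (l : List Int) (p o : List (Int × Int)) :
    l.foldl (pvStepA n) (p, o) =
      (p ++ (l.filter (pvCondP n)).map (pvPair n),
       o ++ (l.filter (pvCondO n)).map (pvPair n)) := by
  induction l generalizing p o with
  | nil => simp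
  | cons w t ih =>
    rw [List.foldl_cons, pvStepA_eq]
    by_cases hp : pvCondP n w <;> by_cases ho : pvCondO n w <;>
      simp [hp, ho, ih, List.filter_cons]

-- two strictly increasing Int lists with the same members are equal
lemma pvEq_of_mem_iff (l₁ l₂ : List Int)
    (h₁ : l₁.Pairwise (· < ·)) (h₂ : l₂.Pairwise (· < ·))
    (hm : ∀ a, a ∈ l₁ ↔ a ∈ l₂) : l₁ = l₂ := by
  have hperm : l₁.Perm l₂ :=
    (List.perm_ext_iff_of_nodup
      (h₁.imp fun {a b} h => ne_of_lt h) (h₂.imp fun {a b} h => ne_of_lt h)).2 hm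
  exact List.Perm.eq_of_pairwise (fun a b _ _ hab hba => absurd hba (lt_asymm hab)) h₁ h₂ hperm

lemma pvFilterP (n : Int) :
    (PySem.List.pyRange 1 (n + 1) 1).filter (pvCondP n) = [20, 32, 64].filter (pvCondP n) := by
  apply pvEq_of_mem_iff
  · exact (PySem.List.pairwise_lt_pyRange_one 1 (n + 1)).filter _
  · exact (by decide : ([20, 32, 64] : List Int).Pairwise (· < ·)).filter _
  · intro a
    simp only [List.mem_filter, PySem.List.mem_pyRange_one, List.mem_cons,
      List.not_mem_nil, or_false]
    constructor
    · rintro ⟨⟨h1, _⟩, hc⟩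
      refine ⟨?_, hc⟩
      obtain ⟨_, _, hca⟩ := (pvCondP_iff n a).1 hc
      rcases hca with (h | h) | ⟨h, _⟩ <;> tauto
    · rintro ⟨hmem, hc⟩
      obtain ⟨hm0, ⟨hfd, _⟩, _⟩ := (pvCondP_iff n a).1 hc
      have hw : (0:Int) < a := by rcases hmem with h | h | h <;> omega
      have hle := pvW_le n a hw hm0 hfd
      exact ⟨⟨by omega, by omega⟩, hc⟩

lemma pvFilterO (n : Int) :
    (PySem.List.pyRange 1 (n + 1) 1).filter (pvCondO n) =
      (PySem.List.pyRange 1 32 1).filter (pvCondO n) := by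
  apply pvEq_of_mem_iff
  · exact (PySem.List.pairwise_lt_pyRange_one 1 (n + 1)).filter _
  · exact (PySem.List.pairwise_lt_pyRange_one 1 32).filter _
  · intro a
    simp only [List.mem_filter, PySem.List.mem_pyRange_one]
    constructor
    · rintro ⟨⟨h1, _⟩, hc⟩
      obtain ⟨_, _, hlt, _⟩ := (pvCondO_iff n a).1 hc
      exact ⟨⟨h1, by omega⟩, hc⟩
    · rintro ⟨⟨h1, h2⟩, hc⟩
      obtain ⟨hm0, ⟨hfd, _⟩, _⟩ := (pvCondO_iff n a).1 hc
      have hle := pvW_le n a (by omega) hm0 hfd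
      exact ⟨⟨h1, by omega⟩, hc⟩

-- B's loop bodies written as filter-style steps
lemma pvStepB1_eq (n w : Int) (hw : w = 20 ∨ w = 32 ∨ w = 64) (acc : List (Int × Int)) :
    pvStepB1 n acc w = if pvCondP n w then acc ++ [pvPair n w] else acc := by
  have hwpos : (0:Int) < w := by rcases hw with h | h | h <;> omega
  unfold pvStepB1 pvHeightB
  by_cases hm0 : PySem.Int.mod n w = 0
  · have hiff := pvFd_pos_iff n w hwpos hm0
    by_cases hn : 1 ≤ n
    · by_cases h512 : PySem.Int.floordiv n w ≤ 512
      · simp only [hn, hm0, and_self, if_true, h512, if_pos]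
        by_cases h32 : w ≠ 64 ∨ PySem.Int.mod (PySem.Int.floordiv n w) 32 = 0
        · have hP : pvCondP n w = true := by
            rw [pvCondP_iff]
            refine ⟨hm0, ⟨hiff.1 hn, h512⟩, ?_⟩
            rcases hw with h | h | h <;> rcases h32 with h' | h' <;> tauto
          simp [hP, pvPair]
          intro h
          rcases h32 with h' | h'
          · exact absurd h h'
          · exact (PySem.Int.mod_eq_zero_iff_dvd _ _).1 h'
        · have hP : pvCondP n w = false := by
            rw [Bool.eq_false_iff, Ne, pvCondP_iff]
            rintro ⟨_, _, (h | h) | ⟨h, h'⟩⟩ <;> push_neg at h32 <;> omega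
          push_neg at h32
          obtain ⟨he, hmne⟩ := h32
          simp [hP]
          exact ⟨he, fun hd => hmne ((PySem.Int.mod_eq_zero_iff_dvd _ _).2 hd)⟩
      · have hP : pvCondP n w = false := by
          rw [Bool.eq_false_iff, Ne, pvCondP_iff]
          rintro ⟨_, ⟨_, h⟩, _⟩; exact h512 h
        simp [hn, hm0, h512, hP]
    · have hP : pvCondP n w = false := by
        rw [Bool.eq_false_iff, Ne, pvCondP_iff]
        rintro ⟨_, ⟨h1, _⟩, _⟩; exact hn (hiff.2 h1)
      simp [hn, hm0, hP]
  · have hP : pvCondP n w = false := by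
      rw [Bool.eq_false_iff, Ne, pvCondP_iff]
      rintro ⟨h, _⟩; exact hm0 h
    simp [hm0, hP]

lemma pvStepB2_eq (n w : Int) (h1 : 1 ≤ w) (h2 : w < 32) (acc : List (Int × Int)) :
    pvStepB2 n acc w = if pvCondO n w then acc ++ [pvPair n w] else acc := by
  unfold pvStepB2 pvHeightB
  by_cases hm0 : PySem.Int.mod n w = 0
  · have hiff := pvFd_pos_iff n w (by omega) hm0
    by_cases h20 : w = 20
    · subst h20
      have hO : pvCondO n (20:Int) = false := by
        rw [Bool.eq_false_iff, Ne, pvCondO_iff]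
        rintro ⟨_, _, _, h⟩; exact h rfl
      simp [hO]
    · by_cases hn : 1 ≤ n
      · by_cases h512 : PySem.Int.floordiv n w ≤ 512
        · have hO : pvCondO n w = true :=
            (pvCondO_iff n w).2 ⟨hm0, ⟨hiff.1 hn, h512⟩, h2, h20⟩
          simp [h20, hn, hm0, h512, hO, pvPair]
        · have hO : pvCondO n w = false := by
            rw [Bool.eq_false_iff, Ne, pvCondO_iff]
            rintro ⟨_, ⟨_, h⟩, _⟩; exact h512 h
          simp [h20, hn, hm0, h512, hO]
      · have hO : pvCondO n w = false := by
          rw [Bool.eq_false_iff, Ne, pvCondO_iff]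
          rintro ⟨_, ⟨hfd, _⟩, _⟩; exact hn (hiff.2 hfd)
        simp [h20, hn, hO]
  · have hO : pvCondO n w = false := by
      rw [Bool.eq_false_iff, Ne, pvCondO_iff]
      rintro ⟨h, _⟩; exact hm0 h
    simp [hm0, hO]

lemma pvAltVal (n : Int) :
    get_possible_dimensions_py_alt n =
      ([20, 32, 64].filter (pvCondP n)).map (pvPair n) ++
        ((PySem.List.pyRange 1 32 1).filter (pvCondO n)).map (pvPair n) := by
  unfold get_possible_dimensions_py_alt
  have hb1 : [(20:Int), 32, 64].foldl (pvStepB1 n) [] =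
      ([20, 32, 64].filter (pvCondP n)).map (pvPair n) := by
    rw [PySem.List.foldl_congr_mem _ _
        (fun acc w => if pvCondP n w then acc ++ [pvPair n w] else acc) _
        (fun acc w hw => pvStepB1_eq n w (by simpa using hw) acc)]
    simpa using PySem.List.foldl_append_if (pvCondP n) (pvPair n) [20, 32, 64] []
  have hb2 : ∀ init : List (Int × Int),
      (PySem.List.pyRange 1 32 1).foldl (pvStepB2 n) init =
      init ++ ((PySem.List.pyRange 1 32 1).filter (pvCondO n)).map (pvPair n) := by
    intro init
    rw [PySem.List.foldl_congr_mem _ _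
        (fun acc w => if pvCondO n w then acc ++ [pvPair n w] else acc) _
        (fun acc w hw => by
          have := (PySem.List.mem_pyRange_one).1 hw
          exact pvStepB2_eq n w (by omega) (by omega) acc)]
    exact PySem.List.foldl_append_if (pvCondO n) (pvPair n) _ init
  rw [hb1, hb2]

-- the already-ordered others list survives A's sort untouched
lemma pvSortO (n : Int) :
    PySem.List.sorted (((PySem.List.pyRange 1 32 1).filter (pvCondO n)).map (pvPair n))
      (fun p => p.1) =
      ((PySem.List.pyRange 1 32 1).filter (pvCondO n)).map (pvPair n) := by
  apply PySem.List.sorted_eq_of_perm_of_pairwise_lt _ _ _ (List.Perm.refl _)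
  rw [List.pairwise_map]
  exact ((PySem.List.pairwise_lt_pyRange_one 1 32).filter _).imp (fun {a b} h => h)

-- the already-ordered priority list survives A's sort untouched
lemma pvSortP (n : Int) :
    PySem.List.sorted2 (([20, 32, 64].filter (pvCondP n)).map (pvPair n))
      (fun p => (PySem.Dict.ofList [((20:Int), (0:Int)), (32, 1), (64, 2)]).getD p.1 99)
      (fun p => p.2) =
      ([20, 32, 64].filter (pvCondP n)).map (pvPair n) := by
  by_cases c20 : pvCondP n 20 <;> by_cases c32 : pvCondP n 32 <;> by_cases c64 : pvCondP n 64 <;>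
    simp only [List.filter, c20, c32, c64, List.map, pvPair] <;>
    simp [PySem.List.sorted2, PySem.List.insertBy, PySem.Dict.getD, PySem.Dict.ofList,
      PySem.Dict.get?, PySem.Dict.update, PySem.Dict.empty, PySem.Dict.insert, List.find?,
      PySem.Dict.contains]

theorem pvMain (n : Int) : get_possible_dimensions_py n = get_possible_dimensions_py_alt n := by
  unfold get_possible_dimensions_py
  rw [pvFoldA, pvAltVal]
  simp only [List.nil_append]
  rw [pvFilterP, pvFilterO, pvSortO, pvSortP]

-- ===== VERDICT (by name: the statement is the Claim_ definition above) =====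
theorem get_possible_dimensions_py_spec : Claim_equal_get_possible_dimensions_py := by
  intro n _
  unfold Spec_get_possible_dimensions_py
  exact pvMain n
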